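-- pv_equiv track=rewrite | github.com/cosc140-s22/cosc140-hw3-ahmed_hw3 | ghost.py | valid_frag
-- ===== SOURCE A (Python) =====
-- def valid_frag(fragment: str, words: list[str]):
--     for word in words:
--         if word.startswith(fragment):
--             # Fragment that is a valid word longer than 3 letter ends the game
--             if(len(fragment) > 3):
--                 return fragment not in words
--             else:
--                 return True
--     return False  # Fragment that cannot become word ends the game
-- ===== SOURCE B (Python) =====
-- def valid_frag(fragment: str, words: list[str]):
--     has_prefix = False
--     is_word = False
--     for word in words:
--         has_prefix = has_prefix or word.startswith(fragment)
--         is_word = is_word or word == fragment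
--     if not has_prefix:
--         return False
--     if len(fragment) > 3:
--         return not is_word
--     return True
-- ===== Notes on version B (the rewrite author's own statement) =====
-- stated objective: alternative
-- what changed: A's early-exit loop with a nested 'fragment not in words' rescan is replaced by a single full accumulating pass computing two flags (any prefix match, exact word present) followed by a pure branch on the flags.
import Mathlib
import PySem

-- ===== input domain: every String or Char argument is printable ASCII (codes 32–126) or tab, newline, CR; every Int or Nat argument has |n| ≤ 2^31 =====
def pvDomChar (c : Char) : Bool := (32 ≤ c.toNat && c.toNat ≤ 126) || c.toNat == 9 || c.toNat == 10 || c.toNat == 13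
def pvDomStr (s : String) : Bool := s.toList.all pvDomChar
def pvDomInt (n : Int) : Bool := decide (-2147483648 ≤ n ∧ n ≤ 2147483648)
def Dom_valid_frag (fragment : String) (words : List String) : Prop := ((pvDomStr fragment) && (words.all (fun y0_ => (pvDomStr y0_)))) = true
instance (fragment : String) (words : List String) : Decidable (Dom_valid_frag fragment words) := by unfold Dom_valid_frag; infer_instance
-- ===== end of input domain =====

-- B replaces A's early-exit loop (with a nested full membership rescan) by one full
-- accumulating pass computing two flags, then a pure branch on the flags (objective: alternative).

-- ===== PORT A =====
-- the for-loop of A: first word with a matching prefix decides the result;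
-- 'fragment not in words' scans the WHOLE original list
def vfLoopA (fragment : String) (words : List String) : List String → Bool
  | [] => false
  | w :: ws =>
    if PySem.Str.startswith w fragment then
      if PySem.Str.len fragment > 3 then !(words.contains fragment) else true
    else vfLoopA fragment words ws

def valid_frag (fragment : String) (words : List String) : Bool :=
  vfLoopA fragment words words

-- ===== PORT B =====
def valid_frag_alt (fragment : String) (words : List String) : Bool :=
  let flags := words.foldl
    (fun (p : Bool × Bool) w =>
      (p.1 || PySem.Str.startswith w fragment, p.2 || (w == fragment)))
    (false, false)
  if !flags.1 then false
  else if PySem.Str.len fragment > 3 then !flags.2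
  else true

-- ===== PRECONDITION & SPEC =====
def Spec_valid_frag (fragment : String) (words : List String) (out : Bool) : Prop := out = valid_frag_alt fragment words
instance (fragment : String) (words : List String) (out : Bool) : Decidable (Spec_valid_frag fragment words out) := by unfold Spec_valid_frag; infer_instance

-- ===== CLAIM (what is proved, stated in full; the proofs are below) =====
def Claim_equal_valid_frag : Prop := ∀ (fragment : String) (words : List String), Dom_valid_frag fragment words → Spec_valid_frag fragment words (valid_frag fragment words)

-- ===== LEMMAS AND PROOFS =====

-- B's fold computes (any prefix match, membership of fragment)
theorem vf_fold_flags (fragment : String) (ws : List String) (a b : Bool) :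
    ws.foldl (fun (p : Bool × Bool) w =>
      (p.1 || PySem.Str.startswith w fragment, p.2 || (w == fragment))) (a, b)
    = (a || ws.any (fun w => PySem.Str.startswith w fragment), b || ws.contains fragment) := by
  induction ws generalizing a b with
  | nil => simp
  | cons w ws ih =>
    simp only [List.foldl, List.any_cons, List.contains_cons, ih]
    simp [Bool.or_assoc, BEq.comm]

-- A's loop, characterised by the 'any' of the scanned suffix
theorem vfLoopA_eq (fragment : String) (words ws : List String) :
    vfLoopA fragment words ws =
      if ws.any (fun w => PySem.Str.startswith w fragment) then
        (if PySem.Str.len fragment > 3 then !(words.contains fragment) else true)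
      else false := by
  induction ws with
  | nil => simp [vfLoopA]
  | cons w ws ih =>
    simp only [vfLoopA, List.any_cons, ih]
    by_cases h : PySem.Str.startswith w fragment = true
    · rw [if_pos h, if_pos (show _ = true by rw [h, Bool.true_or])]
    · have h' : PySem.Str.startswith w fragment = false := by simpa using h
      rw [if_neg h]
      simp only [h', Bool.false_or]

-- ===== VERDICT (by name: the statement is the Claim_ definition above) =====
theorem valid_frag_spec : Claim_equal_valid_frag := by
  intro fragment words _
  unfold Spec_valid_frag valid_frag valid_frag_alt
  rw [vfLoopA_eq, vf_fold_flags]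
  simp only [Bool.false_or]
  by_cases h : words.any (fun w => PySem.Str.startswith w fragment) = true
  · rw [if_pos h, h, Bool.not_true, if_neg (by simp : ¬ (false = true))]
  · have h' : words.any (fun w => PySem.Str.startswith w fragment) = false := by
      simpa using h
    rw [h', Bool.not_false, if_neg (by simp), if_pos rfl]
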